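-- pv_equiv track=rewrite | github.com/cfhaiteeh/PG-GSQL | new_i_data_process.py | cal_where
-- ===== SOURCE A (Python) =====
-- CLAUSE_KEYWORDS = ('select','having', 'from', 'where', 'group', 'order', 'limit', 'intersect', 'union', 'except','desc','asc')
--
-- def cal_where(sql_toks,column_names):
--     nc = [tk[1].lower() for tk in column_names]
--     num = 0
--     flag = 0
--     whe1_cols = []
--     for tk in sql_toks:
--         tk = tk.lower()
--         if flag == 1 and tk in CLAUSE_KEYWORDS:
--             break
--         if tk == 'where' and flag == 0:
--             flag = 1
--         if flag == 1 and (tk in nc or tk == '*'):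
--             num += 1
--             whe1_cols.append(tk)
--     return num, whe1_cols
-- ===== SOURCE B (Python) =====
-- CLAUSE_KEYWORDS = ('select','having', 'from', 'where', 'group', 'order', 'limit', 'intersect', 'union', 'except','desc','asc')
--
-- def cal_where(sql_toks, column_names):
--     toks = [t.lower() for t in sql_toks]
--     if 'where' not in toks:
--         return 0, []
--     i = toks.index('where')
--     j = i + 1
--     while j < len(toks) and toks[j] not in CLAUSE_KEYWORDS:
--         j += 1
--     nc = set(c[1].lower() for c in column_names)
--     cols = [t for t in toks[i:j] if t in nc or t == '*']
--     return len(cols), cols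
-- ===== Notes on version B (the rewrite author's own statement) =====
-- stated objective: simpler
-- what changed: Replaces A's single stateful flag-machine loop with an explicit decomposition: lowercase once, locate the WHERE segment by index-of-'where' plus a scan for the next clause keyword, then filter that slice for column names / '*'.
import Mathlib
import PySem

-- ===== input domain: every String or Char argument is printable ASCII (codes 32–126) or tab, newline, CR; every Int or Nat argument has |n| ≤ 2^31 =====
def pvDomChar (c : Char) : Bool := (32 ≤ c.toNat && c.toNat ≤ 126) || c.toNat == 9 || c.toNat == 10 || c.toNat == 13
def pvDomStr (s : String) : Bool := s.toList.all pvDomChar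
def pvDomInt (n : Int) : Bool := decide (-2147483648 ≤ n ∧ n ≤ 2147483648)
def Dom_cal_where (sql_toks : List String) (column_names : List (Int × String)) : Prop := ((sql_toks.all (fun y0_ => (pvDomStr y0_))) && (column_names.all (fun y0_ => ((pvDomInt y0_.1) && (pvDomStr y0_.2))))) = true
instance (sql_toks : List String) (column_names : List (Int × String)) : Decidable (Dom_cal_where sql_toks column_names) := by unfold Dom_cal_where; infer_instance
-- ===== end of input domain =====

-- B replaces A's stateful flag-machine loop by an explicit decomposition: lowercase once,
-- locate the WHERE segment (index of 'where' up to the next clause keyword), filter that slice.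

def CLAUSE_KEYWORDS : List String :=
  ["select","having","from","where","group","order","limit","intersect","union","except","desc","asc"]

-- ===== PORT A =====
-- the for-loop of A, with `break` as early return; state = (num, flag, whe1_cols)
def calWhereLoop (nc : List String) : List String → Int → Int → List String → Int × List String
  | [], num, _flag, cols => (num, cols)
  | tk0 :: rest, num, flag, cols =>
    let tk := PySem.Str.lower tk0
    if flag = 1 ∧ tk ∈ CLAUSE_KEYWORDS then (num, cols)
    else
      let flag' := if tk = "where" ∧ flag = 0 then 1 else flag
      if flag' = 1 ∧ (tk ∈ nc ∨ tk = "*") then calWhereLoop nc rest (num + 1) flag' (cols ++ [tk])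
      else calWhereLoop nc rest num flag' cols

def cal_where (sql_toks : List String) (column_names : List (Int × String)) : Int × List String :=
  let nc := column_names.map (fun tk => PySem.Str.lower tk.2)
  calWhereLoop nc sql_toks 0 0 []

-- ===== PORT B =====
-- the `while j < len(toks) and toks[j] not in CLAUSE_KEYWORDS: j += 1` loop of Source B
def findJ (toks : List String) (j : Nat) : Nat :=
  if h : j < toks.length then
    if toks[j] ∈ CLAUSE_KEYWORDS then j else findJ toks (j + 1)
  else j
termination_by toks.length - j

def cal_where_alt (sql_toks : List String) (column_names : List (Int × String)) : Int × List String :=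
  let toks := sql_toks.map PySem.Str.lower
  -- `if 'where' not in toks: return 0, []` / `i = toks.index('where')`
  match PySem.List.index? toks "where" with
  | none => (0, [])
  | some i =>
    let j := findJ toks (i + 1)
    let nc := PySem.Set.ofList (column_names.map (fun c => PySem.Str.lower c.2))
    let cols := (PySem.List.slice toks (some (i : Int)) (some (j : Int))).filter
      (fun t => PySem.Set.contains nc t || t == "*")
    ((cols.length : Int), cols)

-- ===== PRECONDITION & SPEC =====
def Spec_cal_where (sql_toks : List String) (column_names : List (Int × String)) (out : Int × List String) : Prop := out = cal_where_alt sql_toks column_names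
instance (sql_toks : List String) (column_names : List (Int × String)) (out : Int × List String) : Decidable (Spec_cal_where sql_toks column_names out) := by unfold Spec_cal_where; infer_instance

-- ===== CLAIM (what is proved, stated in full; the proofs are below) =====
def Claim_equal_cal_where : Prop := ∀ (sql_toks : List String) (column_names : List (Int × String)), Dom_cal_where sql_toks column_names → Spec_cal_where sql_toks column_names (cal_where sql_toks column_names)

-- ===== LEMMAS AND PROOFS =====

-- A's loop on the already-lowercased token list
def coreLoop (nc : List String) : List String → Int → Int → List String → Int × List String
  | [], num, _flag, cols => (num, cols)
  | tk :: rest, num, flag, cols =>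
    if flag = 1 ∧ tk ∈ CLAUSE_KEYWORDS then (num, cols)
    else
      let flag' := if tk = "where" ∧ flag = 0 then 1 else flag
      if flag' = 1 ∧ (tk ∈ nc ∨ tk = "*") then coreLoop nc rest (num + 1) flag' (cols ++ [tk])
      else coreLoop nc rest num flag' cols

def matchP (nc : List String) (t : String) : Bool := decide (t ∈ nc ∨ t = "*")
def notKw (t : String) : Bool := !decide (t ∈ CLAUSE_KEYWORDS)

theorem calWhereLoop_eq_core (nc : List String) (xs : List String) (num flag : Int) (cols : List String) :
    calWhereLoop nc xs num flag cols = coreLoop nc (xs.map PySem.Str.lower) num flag cols := by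
  induction xs generalizing num flag cols with
  | nil => rfl
  | cons t rest ih => simp only [calWhereLoop, coreLoop, List.map_cons]; split_ifs <;> first | rfl | apply ih

theorem core_phase0 (nc : List String) (xs : List String) (num : Int) (cols : List String)
    (h : "where" ∉ xs) : coreLoop nc xs num 0 cols = (num, cols) := by
  induction xs with
  | nil => rfl
  | cons t rest ih =>
    simp only [List.mem_cons, not_or] at h
    have ht : t ≠ "where" := fun e => h.1 e.symm
    simp [coreLoop, ht]
    exact ih h.2

theorem core_split (nc : List String) (p ys : List String) (num : Int) (cols : List String)
    (h : "where" ∉ p) : coreLoop nc (p ++ ys) num 0 cols = coreLoop nc ys num 0 cols := by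
  induction p with
  | nil => rfl
  | cons t rest ih =>
    simp only [List.mem_cons, not_or] at h
    have ht : t ≠ "where" := fun e => h.1 e.symm
    simp [coreLoop, ht]
    exact ih h.2

theorem core_phase1 (nc : List String) (ys : List String) (num : Int) (cols : List String) :
    coreLoop nc ys num 1 cols =
      (num + ((ys.takeWhile notKw).filter (matchP nc)).length,
       cols ++ (ys.takeWhile notKw).filter (matchP nc)) := by
  induction ys generalizing num cols with
  | nil => simp [coreLoop]
  | cons t rest ih =>
    by_cases hk : t ∈ CLAUSE_KEYWORDS
    · simp [coreLoop, hk, notKw]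
    · have htw : (t :: rest).takeWhile notKw = t :: rest.takeWhile notKw := by
        simp [notKw, hk]
      by_cases hm : t ∈ nc ∨ t = "*"
      · have hmt : matchP nc t = true := by simp [matchP, hm]
        simp only [coreLoop, htw, ite_self]
        rw [if_neg (fun hc => hk hc.2), if_pos ⟨trivial, hm⟩, ih]
        simp [hmt]
        omega
      · have hmt : matchP nc t = false := by simp only [matchP, decide_eq_false_iff_not]; exact hm
        simp only [coreLoop, htw, ite_self]
        rw [if_neg (fun hc => hk hc.2), if_neg (fun hc => hm hc.2), ih]
        simp [hmt]

theorem core_where_step (nc : List String) (ys : List String) (num : Int) (cols : List String) :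
    coreLoop nc ("where" :: ys) num 0 cols =
      if "where" ∈ nc then coreLoop nc ys (num + 1) 1 (cols ++ ["where"])
      else coreLoop nc ys num 1 cols := by
  by_cases hm : "where" ∈ nc <;> simp [coreLoop, hm]

theorem findJ_eq (toks : List String) (j : Nat) (h : j ≤ toks.length) :
    findJ toks j = j + ((toks.drop j).takeWhile notKw).length := by
  by_cases hj : j < toks.length
  · rw [findJ, dif_pos hj]
    have hdrop : toks.drop j = toks[j] :: toks.drop (j + 1) := List.drop_eq_getElem_cons hj
    by_cases hk : toks[j] ∈ CLAUSE_KEYWORDS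
    · have htw : (toks.drop j).takeWhile notKw = [] := by
        rw [hdrop, List.takeWhile_cons, if_neg (by simp [notKw, hk])]
      rw [if_pos hk, htw]
      simp
    · have htw : (toks.drop j).takeWhile notKw = toks[j] :: (toks.drop (j + 1)).takeWhile notKw := by
        rw [hdrop, List.takeWhile_cons, if_pos (by simp [notKw, hk])]
      rw [if_neg hk, findJ_eq toks (j + 1) (by omega), htw]
      simp
      omega
  · have hje : j = toks.length := by omega
    rw [findJ, dif_neg hj, hje]
    simp
termination_by toks.length - j

theorem hpred_eq (nc : List String) (t : String) :
    (PySem.Set.contains (PySem.Set.ofList nc) t || t == "*") = matchP nc t := by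
  have hb : (t == "*") = decide (t = "*") := by cases h : t == "*" <;> simp_all
  simp [PySem.Set.contains, matchP, PySem.Set.mem_ofList, hb]

-- ===== VERDICT (by name: the statement is the Claim_ definition above) =====
theorem cal_where_spec : Claim_equal_cal_where := by
  intro sql_toks column_names _dom
  unfold Spec_cal_where cal_where cal_where_alt
  simp only []
  rw [calWhereLoop_eq_core]
  by_cases hw : "where" ∈ (sql_toks.map PySem.Str.lower)
  · have hs : ∃ k, PySem.List.index? (sql_toks.map PySem.Str.lower) "where" = some k := by
      rw [← Option.isSome_iff_exists, PySem.List.index?_isSome_iff]; exact hw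
    obtain ⟨k, hk⟩ := hs
    obtain ⟨p, suf, hsplit, hlen, hnp⟩ := (PySem.List.index?_eq_some_iff _ _ _).mp hk
    rw [hk]
    simp only []
    have hdk0 : (sql_toks.map PySem.Str.lower).drop k = "where" :: suf := by
      rw [hsplit, ← hlen, List.drop_left]
    have hdk : (sql_toks.map PySem.Str.lower).drop (k + 1) = suf := by
      rw [← List.drop_drop, hdk0]; rfl
    have hkb : k + 1 ≤ (sql_toks.map PySem.Str.lower).length := by
      have := List.length_drop (l := sql_toks.map PySem.Str.lower) (i := k)
      rw [hdk0] at this; simp only [List.length_cons, List.length_map] at this ⊢; omega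
    have hj : findJ (sql_toks.map PySem.Str.lower) (k + 1)
        = k + 1 + (suf.takeWhile notKw).length := by
      rw [findJ_eq _ _ hkb, hdk]
    have htake : suf.take (suf.takeWhile notKw).length = suf.takeWhile notKw :=
      (List.prefix_iff_eq_take.mp (List.takeWhile_prefix _)).symm
    have hslice : PySem.List.slice (sql_toks.map PySem.Str.lower)
        (some (k : Int)) (some ((findJ (sql_toks.map PySem.Str.lower) (k + 1) : Nat) : Int))
        = "where" :: suf.takeWhile notKw := by
      rw [hj, PySem.List.slice_natCast, hdk0]
      have : k + 1 + (suf.takeWhile notKw).length - k = (suf.takeWhile notKw).length + 1 := by omega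
      rw [this, List.take_succ_cons, htake]
    rw [hslice, hsplit, core_split _ _ _ _ _ hnp, core_where_step]
    rw [List.filter_congr (fun t _ => hpred_eq (column_names.map (fun c => PySem.Str.lower c.2)) t)]
    by_cases hwnc : "where" ∈ column_names.map (fun c => PySem.Str.lower c.2)
    · rw [if_pos hwnc, core_phase1]
      have hmt : matchP (column_names.map (fun c => PySem.Str.lower c.2)) "where" = true := by
        simp [matchP, hwnc]
      rw [List.filter_cons_of_pos hmt]
      simp
      omega
    · rw [if_neg hwnc, core_phase1]
      have hmt : matchP (column_names.map (fun c => PySem.Str.lower c.2)) "where" = false := by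
        simp only [matchP, decide_eq_false_iff_not]
        rintro (h | h)
        · exact hwnc h
        · exact absurd h (by decide)
      rw [List.filter_cons_of_neg (by simp [hmt])]
      simp
  · have hnone : PySem.List.index? (sql_toks.map PySem.Str.lower) "where" = none :=
      (PySem.List.index?_eq_none_iff _ _).mpr hw
    rw [hnone, core_phase0 _ _ _ _ hw]
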